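-- pv_equiv track=rewrite | github.com/gaoshuaifu/kungfu | algorithms/MaxProductOfRangeMinAndRangeSum/MaxProductOfRangeMinAndRangeSum.py | max_product_of_range_min_and_range_sum
-- ===== SOURCE A (Python) =====
-- def max_product_of_range_min_and_range_sum(nums):
--     n = len(nums)
--
--     # The accumulative sum. The sum in range i...j can be calculated as
--     # accu_sum[j] - accu_sum[i - 1] if i > 0 else accu_sum[j]
--     accu_sums = [0] * n
--     accu_sum = 0
--     for i in range(n):
--         accu_sum += nums[i];
--         accu_sums[i] = accu_sum
--
--     # The monotone stack. The elements in the stack are in increasing order.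
--     stk = []
--
--     # From left to right
--     left = [0] * n
--     for i in range(n):
--         while stk and nums[stk[-1]] >= nums[i]:
--             stk.pop()
--
--         if stk:
--             left[i] = stk[-1] + 1
--         else:
--             left[i] = 0
--
--         stk.append(i)
--
--     stk = []
--
--     # From right to left
--     right = [0] * n
--     for i in range(n - 1, -1, -1):
--         while stk and nums[stk[-1]] >= nums[i]:
--             stk.pop()
--
--         if stk:
--             right[i] = stk[-1] - 1
--         else:
--             right[i] = n - 1
--         stk.append(i)
--
--     # Take each element as min, find out the range and calculate product.
--     max_product = 0
--     for i in range(n):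
--         range_min = nums[i]
--
--         # Get range sum based on accumulative sum and range index
--         left_idx, right_idx = left[i], right[i]
--         range_sum = accu_sums[right_idx] - accu_sums[left_idx - 1] if left_idx > 0 else accu_sums[right_idx]
--
--         max_product = max(max_product, range_min * range_sum)
--
--     return max_product
-- ===== SOURCE B (Python) =====
-- def max_product_of_range_min_and_range_sum(nums):
--     n = len(nums)
--     best = 0
--     for i in range(n):
--         x = nums[i]
--         l = i
--         while l > 0 and nums[l - 1] >= x:
--             l -= 1
--         r = i
--         while r + 1 < n and nums[r + 1] >= x:
--             r += 1
--         best = max(best, x * sum(nums[l:r + 1]))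
--     return best
-- ===== Notes on version B (the rewrite author's own statement) =====
-- stated objective: simpler
-- what changed: Replaces the prefix-sum array and the two monotone-stack passes with a single loop that, for each index taken as the range minimum, finds its span by two local scans to the nearest strictly smaller neighbours and sums the window directly.
import Mathlib
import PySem

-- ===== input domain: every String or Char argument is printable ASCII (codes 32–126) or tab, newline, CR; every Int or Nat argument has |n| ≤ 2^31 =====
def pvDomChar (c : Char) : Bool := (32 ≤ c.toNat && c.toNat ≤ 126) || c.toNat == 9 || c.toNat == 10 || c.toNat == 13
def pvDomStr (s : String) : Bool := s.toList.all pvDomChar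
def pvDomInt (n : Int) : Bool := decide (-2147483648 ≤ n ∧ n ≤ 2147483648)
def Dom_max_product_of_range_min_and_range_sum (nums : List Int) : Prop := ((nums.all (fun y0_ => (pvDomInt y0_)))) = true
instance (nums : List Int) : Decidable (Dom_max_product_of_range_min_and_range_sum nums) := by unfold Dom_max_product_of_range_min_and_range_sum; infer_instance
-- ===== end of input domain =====

-- B replaces the prefix-sum array and the two monotone-stack passes with, for each index,
-- two local scans for the nearest strictly smaller neighbours and a direct window sum (simpler, not faster).

-- ===== PORT A =====
-- the stack is held top-first (Python appends/pops at the right end); indices are in range, so nums[j] = getD j 0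
def popWhile (nums : List Int) (x : Int) : List Nat → List Nat
  | [] => []
  | j :: rest => if x ≤ nums.getD j 0 then popWhile nums x rest else j :: rest

-- accumulative sums: accu_sums[i] = running sum after adding nums[i]
def accuPass (nums : List Int) : List Int :=
  ((List.range nums.length).foldl
    (fun (st : Int × List Int) i =>
      let s := st.1 + nums.getD i 0
      (s, st.2 ++ [s])) (0, [])).2

-- from left to right
def leftPass (nums : List Int) : List Nat :=
  ((List.range nums.length).foldl
    (fun (st : List Nat × List Nat) i =>
      let stk := popWhile nums (nums.getD i 0) st.1
      let lv : Nat := match stk with | [] => 0 | j :: _ => j + 1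
      (i :: stk, st.2 ++ [lv])) ([], [])).2

-- from right to left (right[i] is written at iteration i, i decreasing, hence the prepend)
def rightPass (nums : List Int) : List Nat :=
  ((List.range nums.length).reverse.foldl
    (fun (st : List Nat × List Nat) i =>
      let stk := popWhile nums (nums.getD i 0) st.1
      let rv : Nat := match stk with | [] => nums.length - 1 | j :: _ => j - 1
      (i :: stk, rv :: st.2)) ([], [])).2

-- take each element as min
def max_product_of_range_min_and_range_sum (nums : List Int) : Int :=
  (List.range nums.length).foldl
    (fun best i =>
      let li := (leftPass nums).getD i 0
      let ri := (rightPass nums).getD i 0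
      let rs := if li > 0 then (accuPass nums).getD ri 0 - (accuPass nums).getD (li - 1) 0
                else (accuPass nums).getD ri 0
      max best (nums.getD i 0 * rs)) 0

-- ===== PORT B =====
-- while l > 0 and nums[l-1] >= x: l -= 1
def findL (nums : List Int) (x : Int) : Nat → Nat
  | 0 => 0
  | l + 1 => if x ≤ nums.getD l 0 then findL nums x l else l + 1

-- while r + 1 < n and nums[r+1] >= x: r += 1
def findR (nums : List Int) (x : Int) (r : Nat) : Nat :=
  if _h : r + 1 < nums.length ∧ x ≤ nums.getD (r + 1) 0 then findR nums x (r + 1) else r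
termination_by nums.length - r
decreasing_by omega

def max_product_of_range_min_and_range_sum_alt (nums : List Int) : Int :=
  (List.range nums.length).foldl
    (fun best i =>
      let x := nums.getD i 0
      let l := findL nums x i
      let r := findR nums x i
      max best (x * ((nums.drop l).take (r + 1 - l)).sum)) 0

-- ===== PRECONDITION & SPEC =====
def Spec_max_product_of_range_min_and_range_sum (nums : List Int) (out : Int) : Prop := out = max_product_of_range_min_and_range_sum_alt nums
instance (nums : List Int) (out : Int) : Decidable (Spec_max_product_of_range_min_and_range_sum nums out) := by unfold Spec_max_product_of_range_min_and_range_sum; infer_instance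

-- ===== CLAIM (what is proved, stated in full; the proofs are below) =====
def Claim_equal_max_product_of_range_min_and_range_sum : Prop := ∀ (nums : List Int), Dom_max_product_of_range_min_and_range_sum nums → Spec_max_product_of_range_min_and_range_sum nums (max_product_of_range_min_and_range_sum nums)

-- ===== LEMMAS AND PROOFS =====

theorem findL_le (nums : List Int) (x : Int) : ∀ i, findL nums x i ≤ i := by
  intro i; induction i with
  | zero => simp [findL]
  | succ l ih => simp only [findL]; split <;> omega

theorem findL_ge (nums : List Int) (x : Int) :
    ∀ i t, findL nums x i ≤ t → t < i → x ≤ nums.getD t 0 := by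
  intro i; induction i with
  | zero => omega
  | succ l ih =>
    intro t h1 h2
    simp only [findL] at h1
    split at h1
    · rcases Nat.lt_or_ge t l with h | h
      · exact ih t h1 h
      · have : t = l := by omega
        subst this; assumption
    · omega

theorem findL_skip (nums : List Int) (x : Int) :
    ∀ b a, a ≤ b → (∀ t, a ≤ t → t < b → x ≤ nums.getD t 0) → findL nums x b = findL nums x a := by
  intro b; induction b with
  | zero =>
    intro a h _
    have ha : a = 0 := by omega
    rw [ha]
  | succ c ih =>
    intro a h hall
    rcases Nat.eq_or_lt_of_le h with h' | h'
    · rw [h']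
    · have hc : a ≤ c := by omega
      simp only [findL]
      rw [if_pos (hall c hc (by omega))]
      exact ih a hc (fun t ht1 ht2 => hall t ht1 (by omega))

theorem chain_dec (nums : List Int) (i : Nat) (h : ¬ findL nums (nums.getD i 0) i = 0) :
    findL nums (nums.getD i 0) i - 1 < i := by
  have := findL_le nums (nums.getD i 0) i; omega

def chain (nums : List Int) (i : Nat) : List Nat :=
  if h : findL nums (nums.getD i 0) i = 0 then [i]
  else i :: chain nums (findL nums (nums.getD i 0) i - 1)
termination_by i
decreasing_by exact chain_dec nums i h

theorem findR_ge_self (nums : List Int) (x : Int) (r : Nat) : r ≤ findR nums x r := by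
  fun_induction findR with
  | case1 r h ih => omega
  | case2 r h => omega

theorem findR_lt (nums : List Int) (x : Int) (r : Nat) (h : r < nums.length) :
    findR nums x r < nums.length := by
  fun_induction findR with
  | case1 r h' ih => exact ih (by omega)
  | case2 r h' => omega

theorem findR_ge (nums : List Int) (x : Int) (r : Nat) :
    ∀ t, r < t → t ≤ findR nums x r → x ≤ nums.getD t 0 := by
  fun_induction findR with
  | case1 r h ih =>
    intro t h1 h2
    rcases Nat.lt_or_ge (r + 1) t with h3 | h3
    · exact ih t h3 h2
    · have : t = r + 1 := by omega
      subst this; exact h.2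
  | case2 r h =>
    intro t h1 h2; omega

theorem findR_stop (nums : List Int) (x : Int) (r : Nat) (h : ¬ (r + 1 < nums.length ∧ x ≤ nums.getD (r+1) 0)) :
    findR nums x r = r := by
  rw [findR, dif_neg h]

theorem findR_skip (nums : List Int) (x : Int) :
    ∀ d a, a + d < nums.length → (∀ t, a < t → t ≤ a + d → x ≤ nums.getD t 0) →
      findR nums x a = findR nums x (a + d) := by
  intro d; induction d with
  | zero => intro a _ _; rfl
  | succ c ih =>
    intro a hlt hall
    have h1 : a + 1 < nums.length := by omega
    rw [findR, dif_pos ⟨h1, hall (a+1) (by omega) (by omega)⟩]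
    have := ih (a+1) (by omega) (fun t ht1 ht2 => hall t (by omega) (by omega))
    rw [this]; ring_nf

def chainR (nums : List Int) (j : Nat) : List Nat :=
  if nums.length ≤ j + 1 ∨ findR nums (nums.getD j 0) j = nums.length - 1 then [j]
  else j :: chainR nums (findR nums (nums.getD j 0) j + 1)
termination_by nums.length - j
decreasing_by
  have h1 := findR_ge_self nums (nums.getD j 0) j
  have h2 := findR_lt nums (nums.getD j 0) j (by omega)
  omega

theorem chainR_eq (nums : List Int) (j : Nat) (h : j < nums.length) :
    chainR nums j = (if findR nums (nums.getD j 0) j = nums.length - 1 then [j]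
      else j :: chainR nums (findR nums (nums.getD j 0) j + 1)) := by
  rw [chainR]
  rcases Nat.lt_or_ge (j+1) nums.length with h1 | h1
  · simp only [Nat.not_le.mpr h1, false_or]
  · have hstop : findR nums (nums.getD j 0) j = nums.length - 1 := by
      rw [findR_stop _ _ _ (by omega)]; omega
    rw [if_pos (Or.inr hstop), if_pos hstop]

theorem chain_head (nums : List Int) (j : Nat) :
    ∃ t, chain nums j = j :: t := by
  rw [chain]; split <;> exact ⟨_, rfl⟩

theorem chainR_head (nums : List Int) (j : Nat) :
    ∃ t, chainR nums j = j :: t := by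
  rw [chainR]; split <;> exact ⟨_, rfl⟩

-- characterisation of popping the left-pass stack
theorem popChainL (nums : List Int) :
    ∀ j x, popWhile nums x (chain nums j) =
      (if findL nums x (j + 1) = 0 then [] else chain nums (findL nums x (j + 1) - 1)) := by
  intro j
  induction j using Nat.strong_induction_on with
  | _ j ih =>
    intro x
    by_cases hx : x ≤ nums.getD j 0
    · have hL1 : findL nums x (j + 1) = findL nums x j := by
        simp only [findL]; rw [if_pos hx]
      by_cases hz : findL nums (nums.getD j 0) j = 0
      · have hLz : findL nums x j = 0 := by
          have h0 : findL nums x j = findL nums x 0 :=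
            findL_skip nums x j 0 (Nat.zero_le j) (fun t _ ht2 =>
              le_trans hx (findL_ge nums (nums.getD j 0) j t (by omega) ht2))
          rw [h0]; rfl
        rw [chain, dif_pos hz]
        simp only [popWhile, if_pos hx]
        rw [hL1, hLz]
        rfl
      · rw [chain, dif_neg hz]
        simp only [popWhile, if_pos hx]
        have hskip : findL nums x j = findL nums x (findL nums (nums.getD j 0) j) :=
          findL_skip nums x j _ (findL_le nums _ j) (fun t ht1 ht2 =>
            le_trans hx (findL_ge nums (nums.getD j 0) j t ht1 ht2))
        have hrec := ih _ (chain_dec nums j hz) x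
        have hL'1 : findL nums (nums.getD j 0) j - 1 + 1 = findL nums (nums.getD j 0) j := by
          omega
        rw [hrec, hL'1, hL1, hskip]
    · have hL1 : findL nums x (j + 1) = j + 1 := by
        simp only [findL]; rw [if_neg hx]
      rw [hL1, if_neg (Nat.succ_ne_zero j), Nat.add_sub_cancel]
      obtain ⟨t, ht⟩ := chain_head nums j
      rw [ht]
      simp only [popWhile, if_neg hx]

-- characterisation of popping the right-pass stack
theorem popChainR (nums : List Int) :
    ∀ m j, nums.length - j ≤ m → j < nums.length → ∀ x, popWhile nums x (chainR nums j) =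
      (if x ≤ nums.getD j 0 then
        (if findR nums x j = nums.length - 1 then [] else chainR nums (findR nums x j + 1))
       else chainR nums j) := by
  intro m
  induction m with
  | zero => intro j h1 h2; omega
  | succ m ih =>
    intro j hm hj x
    rw [chainR_eq nums j hj]
    by_cases hx : x ≤ nums.getD j 0
    · rw [if_pos hx]
      set R0 := findR nums (nums.getD j 0) j with hR0
      have hR0j : j ≤ R0 := findR_ge_self nums _ j
      have hR0lt : R0 < nums.length := findR_lt nums _ j hj
      by_cases hend : R0 = nums.length - 1
      · rw [if_pos hend]
        simp only [popWhile, if_pos hx]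
        have hskip : findR nums x j = findR nums x R0 := by
          have := findR_skip nums x (R0 - j) j (by omega)
            (fun t ht1 ht2 => le_trans hx (findR_ge nums (nums.getD j 0) j t ht1 (by omega)))
          rw [this]; congr 1; omega
        have : findR nums x R0 = R0 := findR_stop nums x R0 (by omega)
        rw [hskip, this, if_pos hend]
      · rw [if_neg hend]
        simp only [popWhile, if_pos hx]
        have hR1 : R0 + 1 < nums.length := by omega
        have hrec := ih (R0 + 1) (by omega) hR1 x
        rw [hrec]
        have hskip : findR nums x j = findR nums x R0 := by
          have := findR_skip nums x (R0 - j) j (by omega)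
            (fun t ht1 ht2 => le_trans hx (findR_ge nums (nums.getD j 0) j t ht1 (by omega)))
          rw [this]; congr 1; omega
        by_cases hx1 : x ≤ nums.getD (R0 + 1) 0
        · have : findR nums x R0 = findR nums x (R0 + 1) := by
            rw [findR, dif_pos ⟨hR1, hx1⟩]
          rw [if_pos hx1, hskip, this]
        · have : findR nums x R0 = R0 := findR_stop nums x R0 (fun h => hx1 h.2)
          rw [if_neg hx1, hskip, this, if_neg hend]
    · rw [if_neg hx]
      by_cases hend : findR nums (nums.getD j 0) j = nums.length - 1
      · rw [if_pos hend]
        simp only [popWhile, if_neg hx]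
      · rw [if_neg hend]
        simp only [popWhile, if_neg hx]

-- abbreviations for the per-index quantities
def fL (nums : List Int) (i : Nat) : Nat := findL nums (nums.getD i 0) i
def fR (nums : List Int) (i : Nat) : Nat := findR nums (nums.getD i 0) i

-- the accumulative-sum pass produces the prefix sums
theorem accu_spec (nums : List Int) :
    ∀ k, (List.range k).foldl
      (fun (st : Int × List Int) i =>
        let s := st.1 + nums.getD i 0
        (s, st.2 ++ [s])) (0, [])
      = ((nums.take k).sum, (List.range k).map (fun j => (nums.take (j+1)).sum)) := by
  intro k; induction k with
  | zero => simp
  | succ k ih =>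
    have hsum : (nums.take (k+1)).sum = (nums.take k).sum + nums.getD k 0 := by
      rcases Nat.lt_or_ge k nums.length with h | h
      · rw [List.sum_take_succ _ _ h, List.getD_eq_getElem _ _ h]
      · rw [List.take_of_length_le h, List.take_of_length_le (by omega),
          List.getD_eq_default _ _ h]
        ring
    rw [List.range_succ, List.foldl_append, ih]
    simp only [List.foldl_cons, List.foldl_nil, List.map_append, List.map_cons,
      List.map_nil, Prod.mk.injEq]
    exact ⟨hsum.symm, by rw [hsum]⟩

-- the left pass produces fL at every index
theorem left_spec (nums : List Int) :
    ∀ k, (List.range k).foldl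
      (fun (st : List Nat × List Nat) i =>
        let stk := popWhile nums (nums.getD i 0) st.1
        let lv : Nat := match stk with | [] => 0 | j :: _ => j + 1
        (i :: stk, st.2 ++ [lv])) ([], [])
      = ((if k = 0 then [] else chain nums (k - 1)), (List.range k).map (fL nums)) := by
  intro k; induction k with
  | zero => simp
  | succ k ih =>
    rw [List.range_succ, List.foldl_append, ih]
    simp only [List.foldl_cons, List.foldl_nil, List.map_append, List.map_cons, List.map_nil,
      Prod.mk.injEq]
    by_cases hk : k = 0
    · subst hk
      refine ⟨?_, ?_⟩
      · simp only [Nat.add_sub_cancel, if_neg (Nat.succ_ne_zero 0)]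
        conv_rhs => rw [chain]
        simp [popWhile, findL]
      · simp [popWhile, fL, findL]
    · rw [if_neg hk, if_neg (Nat.succ_ne_zero k), Nat.add_sub_cancel]
      have hpop := popChainL nums (k - 1) (nums.getD k 0)
      have hk1 : k - 1 + 1 = k := by omega
      rw [hk1] at hpop
      rw [hpop]
      by_cases hz : findL nums (nums.getD k 0) k = 0
      · refine ⟨?_, ?_⟩
        · rw [if_pos hz]
          conv_rhs => rw [chain]
          rw [dif_pos hz]
        · rw [if_pos hz]
          simp only [fL, hz]
      · obtain ⟨t, ht⟩ := chain_head nums (findL nums (nums.getD k 0) k - 1)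
        refine ⟨?_, ?_⟩
        · rw [if_neg hz]
          conv_rhs => rw [chain]
          rw [dif_neg hz]
        · rw [if_neg hz, ht]
          simp only [List.append_cancel_left_eq, List.cons.injEq, and_true]
          simp only [fL]
          omega

-- the right pass produces fR at every index
theorem right_spec (nums : List Int) :
    ∀ d i, nums.length - i ≤ d → i ≤ nums.length →
      ((List.range' i (nums.length - i)).reverse).foldl
      (fun (st : List Nat × List Nat) i =>
        let stk := popWhile nums (nums.getD i 0) st.1
        let rv : Nat := match stk with | [] => nums.length - 1 | j :: _ => j - 1
        (i :: stk, rv :: st.2)) ([], [])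
      = ((if i = nums.length then [] else chainR nums i),
         (List.range' i (nums.length - i)).map (fR nums)) := by
  intro d
  induction d with
  | zero =>
    intro i hd hi
    have h0 : i = nums.length := by omega
    subst h0
    simp
  | succ d ih =>
    intro i hd hi
    by_cases hin : i = nums.length
    · subst hin; simp
    · have hin' : i < nums.length := by omega
      have hcons : List.range' i (nums.length - i) = i :: List.range' (i+1) (nums.length - (i+1)) := by
        have h1 : nums.length - i = (nums.length - (i+1)) + 1 := by omega
        rw [h1, List.range'_succ]
      rw [hcons]
      simp only [List.reverse_cons, List.foldl_append, List.foldl_cons, List.foldl_nil]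
      rw [ih (i+1) (by omega) (by omega)]
      simp only [List.map_cons, Prod.mk.injEq, if_neg hin]
      by_cases hlast : i + 1 = nums.length
      · rw [if_pos hlast]
        have hfR : findR nums (nums.getD i 0) i = i :=
          findR_stop nums _ i (fun h => absurd h.1 (by omega))
        refine ⟨?_, ?_⟩
        · conv_rhs => rw [chainR_eq nums i hin']
          rw [if_pos (by rw [hfR]; omega)]
          simp [popWhile]
        · simp only [popWhile, List.cons.injEq]
          exact ⟨by simp only [fR]; rw [hfR]; omega, trivial⟩
      · rw [if_neg hlast]
        have hi1 : i + 1 < nums.length := by omega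
        have hpop := popChainR nums nums.length (i + 1) (by omega) hi1 (nums.getD i 0)
        rw [hpop]
        by_cases hx : nums.getD i 0 ≤ nums.getD (i + 1) 0
        · rw [if_pos hx]
          have hfR : findR nums (nums.getD i 0) i = findR nums (nums.getD i 0) (i + 1) := by
            rw [findR, dif_pos ⟨hi1, hx⟩]
          by_cases hMend : findR nums (nums.getD i 0) (i + 1) = nums.length - 1
          · rw [if_pos hMend]
            refine ⟨?_, ?_⟩
            · conv_rhs => rw [chainR_eq nums i hin']
              rw [if_pos (by rw [hfR]; exact hMend)]
            · simp only [List.cons.injEq]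
              refine ⟨?_, trivial⟩
              simp only [fR]
              rw [hfR, hMend]
          · rw [if_neg hMend]
            obtain ⟨t, ht⟩ := chainR_head nums (findR nums (nums.getD i 0) (i + 1) + 1)
            refine ⟨?_, ?_⟩
            · conv_rhs => rw [chainR_eq nums i hin']
              rw [if_neg (by rw [hfR]; exact hMend), hfR]
            · rw [ht]
              simp only [List.cons.injEq]
              refine ⟨?_, trivial⟩
              simp only [fR]
              rw [hfR]
              omega
        · rw [if_neg hx]
          have hfR : findR nums (nums.getD i 0) i = i := findR_stop nums _ i (fun h => hx h.2)
          obtain ⟨t, ht⟩ := chainR_head nums (i + 1)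
          refine ⟨?_, ?_⟩
          · conv_rhs => rw [chainR_eq nums i hin']
            rw [if_neg (by rw [hfR]; omega), hfR]
          · rw [ht]
            simp only [List.cons.injEq]
            refine ⟨?_, trivial⟩
            simp only [fR]
            rw [hfR]
            omega

-- the summed window equals the difference of prefix sums
theorem sum_window (nums : List Int) (l k : Nat) (h : l ≤ k) :
    ((nums.drop l).take (k - l)).sum = (nums.take k).sum - (nums.take l).sum := by
  obtain ⟨m, rfl⟩ : ∃ m, k = l + m := ⟨k - l, by omega⟩
  rw [Nat.add_sub_cancel_left, List.take_add, List.sum_append]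
  ring

-- the three passes, in closed form
theorem accuPass_eq (nums : List Int) :
    accuPass nums = (List.range nums.length).map (fun j => (nums.take (j+1)).sum) := by
  unfold accuPass
  rw [accu_spec nums nums.length]

theorem leftPass_eq (nums : List Int) :
    leftPass nums = (List.range nums.length).map (fL nums) := by
  unfold leftPass
  rw [left_spec nums nums.length]

theorem rightPass_eq (nums : List Int) :
    rightPass nums = (List.range nums.length).map (fR nums) := by
  unfold rightPass
  have hrange : (List.range nums.length).reverse = (List.range' 0 (nums.length - 0)).reverse := by
    rw [Nat.sub_zero, List.range_eq_range']
  rw [hrange, right_spec nums nums.length 0 (by omega) (by omega), Nat.sub_zero,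
    ← List.range_eq_range']

-- ===== VERDICT (by name: the statement is the Claim_ definition above) =====
theorem max_product_of_range_min_and_range_sum_spec : Claim_equal_max_product_of_range_min_and_range_sum := by
  intro nums _
  unfold Spec_max_product_of_range_min_and_range_sum
  unfold max_product_of_range_min_and_range_sum max_product_of_range_min_and_range_sum_alt
  rw [accuPass_eq, leftPass_eq, rightPass_eq]
  apply PySem.List.foldl_congr_mem
  intro best i hmem
  have hi : i < nums.length := List.mem_range.mp hmem
  simp only [PySem.List.getD_map_range _ _ _ _ hi]
  have hLle : fL nums i ≤ i := findL_le nums _ i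
  have hRge : i ≤ fR nums i := findR_ge_self nums _ i
  have hRlt : fR nums i < nums.length := findR_lt nums _ i hi
  rw [PySem.List.getD_map_range _ _ _ _ hRlt]
  have hwin := sum_window nums (fL nums i) (fR nums i + 1) (by omega)
  have hgoal : (if fL nums i > 0
      then (nums.take (fR nums i + 1)).sum - ((List.range nums.length).map
        (fun j => (nums.take (j+1)).sum)).getD (fL nums i - 1) 0
      else (nums.take (fR nums i + 1)).sum)
      = ((nums.drop (fL nums i)).take (fR nums i + 1 - fL nums i)).sum := by
    by_cases hl0 : fL nums i > 0
    · rw [if_pos hl0, PySem.List.getD_map_range _ _ _ _ (by omega : fL nums i - 1 < nums.length)]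
      have h1 : fL nums i - 1 + 1 = fL nums i := by omega
      rw [h1, hwin]
    · rw [if_neg hl0]
      have hl0' : fL nums i = 0 := by omega
      rw [hwin, hl0']
      simp
  rw [hgoal]
  simp only [fL, fR]
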